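-- pv_equiv track=rewrite | github.com/jbspillman/elcrapo | archives/v14/four_corners_v1.py | generate_thread_combinations
-- ===== SOURCE A (Python) =====
-- from typing import List, Tuple
--
-- def generate_thread_combinations(total_data_mb: int) -> List[Tuple[int, int]]:
--     """Generate (data_per_thread, thread_count) combinations for given total data"""
--     combinations = []
--
--     # Find all divisors of total_data_mb for thread combinations
--     for threads in range(1, total_data_mb + 1):
--         if total_data_mb % threads == 0:
--             data_per_thread = total_data_mb // threads
--             combinations.append((data_per_thread, threads))
--
--             # Stop when data_per_thread becomes too small to be practical
--             if data_per_thread < 1: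
--                 break
--
--     return combinations
-- ===== SOURCE B (Python) =====
-- def generate_thread_combinations(total_data_mb):
--     """Generate (data_per_thread, thread_count) combinations for given total data.
--
--     Enumerates only divisors d with d*d <= n; each such d yields the co-divisor
--     n//d, so the full ascending divisor list is small + reversed co-divisors.
--     """
--     n = total_data_mb
--     small = []
--     d = 1
--     while d * d <= n:
--         if n % d == 0:
--             small.append(d)
--         d += 1
--     large = [n // d for d in reversed(small) if d * d != n]
--     return [(n // t, t) for t in small + large]
-- ===== Notes on version B (the rewrite author's own statement) =====
-- stated objective: faster
-- what changed: Instead of trial-dividing every t in 1..n, B enumerates only divisors d with d*d <= n and derives the large co-divisors n//d in reverse, concatenating the two halves into the same ascending divisor list.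
import Mathlib
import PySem

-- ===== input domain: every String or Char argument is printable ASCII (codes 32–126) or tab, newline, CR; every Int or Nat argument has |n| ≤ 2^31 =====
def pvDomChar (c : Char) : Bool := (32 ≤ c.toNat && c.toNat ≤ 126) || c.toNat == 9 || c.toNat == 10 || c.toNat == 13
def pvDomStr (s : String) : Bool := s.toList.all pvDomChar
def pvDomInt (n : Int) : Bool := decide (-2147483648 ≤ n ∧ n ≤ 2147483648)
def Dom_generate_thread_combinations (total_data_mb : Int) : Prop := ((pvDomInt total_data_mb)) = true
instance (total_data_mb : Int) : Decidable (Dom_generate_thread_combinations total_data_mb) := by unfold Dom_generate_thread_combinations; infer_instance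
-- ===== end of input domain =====

-- B replaces A's full 1..n trial-division scan by a divisor-pair enumeration up to sqrt(n) (objective: faster, asymptotic).

-- ===== PORT A =====
-- the for-loop with its break, as structural recursion over the range list
def pvALoop (n : Int) : List Int → List (Int × Int) → List (Int × Int)
  | [], combinations => combinations
  | threads :: rest, combinations =>
    if PySem.Int.mod n threads == 0 then
      let data_per_thread := PySem.Int.floordiv n threads
      let combinations2 := combinations ++ [(data_per_thread, threads)]
      if data_per_thread < 1 then combinations2
      else pvALoop n rest combinations2
    else pvALoop n rest combinations

def generate_thread_combinations (total_data_mb : Int) : List (Int × Int) :=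
  pvALoop total_data_mb (PySem.List.pyRange 1 (total_data_mb + 1) 1) []

-- ===== PORT B =====
-- the while-loop collecting divisors d with d*d <= n
def pvBSmall (n : Int) (d : Nat) (small : List Int) : List Int :=
  if (d : Int) * (d : Int) ≤ n then
    pvBSmall n (d + 1) (if PySem.Int.mod n d == 0 then small ++ [(d : Int)] else small)
  else small
termination_by n.toNat + 1 - d
decreasing_by
  have hd : (d : Int) ≤ (d : Int) * (d : Int) := by
    cases d with
    | zero => simp
    | succ k => push_cast; nlinarith [Int.natCast_nonneg k]
  have : (d : Int) ≤ n := le_trans hd (by assumption)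
  omega

def generate_thread_combinations_alt (total_data_mb : Int) : List (Int × Int) :=
  let n := total_data_mb
  let small := pvBSmall n 1 []
  let large := small.reverse.filterMap
    (fun d => if d * d ≠ n then some (PySem.Int.floordiv n d) else none)
  (small ++ large).map (fun t => (PySem.Int.floordiv n t, t))

-- ===== PRECONDITION & SPEC =====
def Spec_generate_thread_combinations (total_data_mb : Int) (out : List (Int × Int)) : Prop := out = generate_thread_combinations_alt total_data_mb
instance (total_data_mb : Int) (out : List (Int × Int)) : Decidable (Spec_generate_thread_combinations total_data_mb out) := by unfold Spec_generate_thread_combinations; infer_instance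

-- ===== CLAIM (what is proved, stated in full; the proofs are below) =====
def Claim_equal_generate_thread_combinations : Prop := ∀ (total_data_mb : Int), Dom_generate_thread_combinations total_data_mb → Spec_generate_thread_combinations total_data_mb (generate_thread_combinations total_data_mb)

-- ===== LEMMAS AND PROOFS =====

theorem pvALoop_eq (n : Int) (ts : List Int) (acc : List (Int × Int))
    (hts : ∀ t ∈ ts, 1 ≤ t ∧ t ≤ n) :
    pvALoop n ts acc =
      acc ++ (ts.filter (fun t => PySem.Int.mod n t == 0)).map
        (fun t => (PySem.Int.floordiv n t, t)) := by
  induction ts generalizing acc with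
  | nil => simp [pvALoop]
  | cons t ts ih =>
    obtain ⟨h1, h2⟩ := hts t (List.mem_cons_self ..)
    have hts' : ∀ x ∈ ts, 1 ≤ x ∧ x ≤ n := fun x hx => hts x (List.mem_cons_of_mem _ hx)
    by_cases hp : (PySem.Int.mod n t == 0) = true
    · have hge : (1:Int) ≤ PySem.Int.floordiv n t :=
        (PySem.Int.le_floordiv_iff_mul_le (by omega)).mpr (by linarith)
      simp only [pvALoop, hp, if_true, not_lt.mpr hge, if_false]
      rw [ih _ hts']
      simp [hp]
    · simp only [pvALoop]
      rw [if_neg (by simpa using hp), ih _ hts']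
      simp [hp]

theorem pvBSmall_eq (n : Int) (d : Nat) (acc : List Int) (hd : 1 ≤ d) :
    pvBSmall n d acc =
      acc ++ (PySem.List.pyRange (d : Int) (n + 1) 1).filter
        (fun t => decide (t * t ≤ n) && (PySem.Int.mod n t == 0)) := by
  fun_induction pvBSmall n d acc with
  | case1 d acc h ih =>
    have hdn : (d:Int) ≤ n := by
      refine le_trans ?_ h
      have : (1:Int) ≤ (d:Int) := by exact_mod_cast hd
      nlinarith
    have ih' := ih (by omega)
    rw [PySem.List.pyRange_one_cons (by omega), List.filter_cons]
    by_cases hp : (PySem.Int.mod n (d:Int) == 0) = true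
    · simp only [hp, if_true, h, Bool.and_true, dite_true,
        Nat.cast_add, Nat.cast_one, decide_true] at ih' ⊢
      rw [ih']
      simp [List.append_assoc]
    · simp only [hp, if_false, Bool.false_eq_true, Bool.and_false, dite_false,
        Nat.cast_add, Nat.cast_one] at ih' ⊢
      rw [ih']
  | case2 d acc h =>
    have hfil : (PySem.List.pyRange (d : Int) (n + 1) 1).filter
        (fun t => decide (t * t ≤ n) && (PySem.Int.mod n t == 0)) = [] := by
      apply List.filter_eq_nil_iff.mpr
      intro t ht
      have htd : (d:Int) ≤ t ∧ t < n + 1 := by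
        simpa using (PySem.List.mem_pyRange_one).mp ht
      have hd1 : (1:Int) ≤ (d:Int) := by exact_mod_cast hd
      have : ¬ (t * t ≤ n) := by nlinarith [htd.1, htd.2]
      simp [this]
    simp [hfil]

theorem pv_pairwise_mem {l : List Int} {R S : Int → Int → Prop} (h : l.Pairwise R)
    (hi : ∀ a ∈ l, ∀ b ∈ l, R a b → S a b) : l.Pairwise S := by
  rw [List.pairwise_iff_forall_sublist] at h ⊢
  intro a b hs
  exact hi a (hs.subset (by simp)) b (hs.subset (by simp)) (h hs)

theorem pv_filterMap (l : List Int) (p : Int → Prop) [DecidablePred p] (f : Int → Int) :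
    l.filterMap (fun x => if p x then some (f x) else none) =
      (l.filter (fun x => decide (p x))).map f := by
  induction l with
  | nil => simp
  | cons a l ih =>
    by_cases hp : p a
    · simp [hp, ih]
    · simp [hp, ih]

theorem pv_split (n : Int) (l : List Int) (hl : l.Pairwise (· < ·)) (hpos : ∀ a ∈ l, 1 ≤ a) :
    l.filter (fun t => decide (t * t ≤ n)) ++ l.filter (fun t => !decide (t * t ≤ n)) = l := by
  induction l with
  | nil => simp
  | cons a l ih =>
    rw [List.pairwise_cons] at hl
    have hpos' : ∀ x ∈ l, 1 ≤ x := fun x hx => hpos x (List.mem_cons_of_mem _ hx)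
    have ha : 1 ≤ a := hpos a (List.mem_cons_self ..)
    by_cases hp : a * a ≤ n
    · simp only [List.filter_cons, hp, decide_true, Bool.not_true, if_true, if_false,
        Bool.false_eq_true, List.cons_append]
      rw [ih hl.2 hpos']
    · have h1 : (a :: l).filter (fun t => decide (t * t ≤ n)) = [] := by
        apply List.filter_eq_nil_iff.mpr
        intro b hb
        rcases List.mem_cons.mp hb with rfl | hb'
        · simp [hp]
        · have : ¬ (b * b ≤ n) := fun hbb =>
            hp (by nlinarith [hl.1 b hb', hpos' b hb'])
          simp [this]
      have h2 : (a :: l).filter (fun t => !decide (t * t ≤ n)) = a :: l := by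
        apply List.filter_eq_self.mpr
        intro b hb
        rcases List.mem_cons.mp hb with rfl | hb'
        · simp [hp]
        · have : ¬ (b * b ≤ n) := fun hbb =>
            hp (by nlinarith [hl.1 b hb', hpos' b hb'])
          simp [this]
      rw [h1, h2, List.nil_append]

-- one divisor below sqrt(n) ↔ its co-divisor above; core arithmetic facts
theorem pv_codiv (n d : Int) (hn : 1 ≤ n) (hd : 1 ≤ d) (hdvd : d ∣ n) :
    1 ≤ PySem.Int.floordiv n d ∧ PySem.Int.floordiv n d ≤ n ∧
      (PySem.Int.floordiv n d) ∣ n ∧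
      PySem.Int.floordiv n (PySem.Int.floordiv n d) = d ∧
      d * (PySem.Int.floordiv n d) = n := by
  obtain ⟨k, hk⟩ := hdvd
  have hkd : PySem.Int.floordiv n d = k := by
    rw [PySem.Int.floordiv_eq_ediv_of_pos (by omega), hk, Int.mul_ediv_cancel_left _ (by omega)]
  have hk1 : 1 ≤ k := by nlinarith
  have hkn : k ≤ n := by nlinarith
  refine ⟨by omega, by omega, ⟨d, by rw [hkd]; linarith [mul_comm d k]⟩, ?_,
    by rw [hkd]; linarith [mul_comm d k]⟩
  rw [hkd, PySem.Int.floordiv_eq_ediv_of_pos (by omega), hk, mul_comm d k,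
    Int.mul_ediv_cancel_left _ (by omega)]

-- strict antitonicity of d ↦ n // d on positive divisors
theorem pv_antitone (n a b : Int) (hn : 1 ≤ n) (hb : 1 ≤ b) (hba : b < a)
    (hda : a ∣ n) (hdb : b ∣ n) :
    PySem.Int.floordiv n a < PySem.Int.floordiv n b := by
  obtain ⟨h1a, _, _, _, h5a⟩ := pv_codiv n a hn (by omega) hda
  obtain ⟨h1b, _, _, _, h5b⟩ := pv_codiv n b hn hb hdb
  nlinarith

theorem pv_large (n : Int) (hn : 1 ≤ n)
    (L : List Int) (hLpw : L.Pairwise (· < ·))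
    (hLmem : ∀ t, t ∈ L ↔ 1 ≤ t ∧ t ≤ n ∧ t ∣ n) :
    (((L.filter (fun t => decide (t * t ≤ n))).reverse.filter
        (fun d => decide (d * d ≠ n))).map (fun d => PySem.Int.floordiv n d))
      = L.filter (fun t => !decide (t * t ≤ n)) := by
  set Ls := L.filter (fun t => decide (t * t ≤ n)) with hLs
  set lr := Ls.reverse.filter (fun d => decide (d * d ≠ n)) with hlr
  set M := lr.map (fun d => PySem.Int.floordiv n d) with hM
  set Lg := L.filter (fun t => !decide (t * t ≤ n)) with hLg
  have hmem_lr : ∀ d, d ∈ lr ↔ (1 ≤ d ∧ d ∣ n ∧ d * d < n) := by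
    intro d
    rw [hlr, List.mem_filter, List.mem_reverse, hLs, List.mem_filter, hLmem]
    constructor
    · rintro ⟨⟨⟨hd1, _, hdvd⟩, hsq⟩, hne⟩
      simp only [decide_eq_true_eq] at hsq hne
      exact ⟨hd1, hdvd, lt_of_le_of_ne hsq hne⟩
    · rintro ⟨hd1, hdvd, hlt⟩
      have : d ≤ n := Int.le_of_dvd (by omega) hdvd
      simp only [decide_eq_true_eq]
      exact ⟨⟨⟨hd1, this, hdvd⟩, by omega⟩, by omega⟩
  have hmem_Lg : ∀ y, y ∈ Lg ↔ (1 ≤ y ∧ y ∣ n ∧ n < y * y) := by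
    intro y
    rw [hLg, List.mem_filter, hLmem]
    constructor
    · rintro ⟨⟨h1, _, h3⟩, h4⟩
      simp only [Bool.not_eq_eq_eq_not, Bool.not_true, decide_eq_false_iff_not, not_le] at h4
      exact ⟨h1, h3, h4⟩
    · rintro ⟨h1, h2, h3⟩
      have : y ≤ n := Int.le_of_dvd (by omega) h2
      simp only [Bool.not_eq_eq_eq_not, Bool.not_true, decide_eq_false_iff_not, not_le]
      exact ⟨⟨h1, this, h2⟩, h3⟩
  -- same members
  have hmemMLg : ∀ y, y ∈ M ↔ y ∈ Lg := by
    intro y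
    rw [hM, List.mem_map]
    constructor
    · rintro ⟨d, hd, rfl⟩
      obtain ⟨hd1, hdvd, hlt⟩ := (hmem_lr d).mp hd
      obtain ⟨h1, h2, h3, h4, h5⟩ := pv_codiv n d hn hd1 hdvd
      refine (hmem_Lg _).mpr ⟨h1, h3, ?_⟩
      nlinarith
    · intro hy
      obtain ⟨hy1, hdvd, hgt⟩ := (hmem_Lg y).mp hy
      obtain ⟨h1, h2, h3, h4, h5⟩ := pv_codiv n y hn hy1 hdvd
      refine ⟨PySem.Int.floordiv n y, (hmem_lr _).mpr ⟨h1, h3, by nlinarith⟩, h4⟩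
  -- both strictly increasing
  have hLspw : Ls.Pairwise (· < ·) := hLpw.filter _
  have hlr_pw : lr.Pairwise (· > ·) := (hLspw.reverse.imp (by exact fun h => h)).filter _
  have hMpw : M.Pairwise (· < ·) := by
    rw [hM, List.pairwise_map]
    refine pv_pairwise_mem hlr_pw ?_
    intro a ha b hb hab
    obtain ⟨ha1, hadvd, _⟩ := (hmem_lr a).mp ha
    obtain ⟨hb1, hbdvd, _⟩ := (hmem_lr b).mp hb
    exact pv_antitone n a b hn hb1 hab hadvd hbdvd
  have hLgpw : Lg.Pairwise (· < ·) := hLpw.filter _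
  -- equal: same members, both strictly sorted
  refine List.Perm.eq_of_pairwise (fun a b _ _ h1 h2 => absurd h2 (not_lt.mpr h1.le)) hMpw hLgpw ?_
  exact (List.perm_ext_iff_of_nodup (hMpw.imp fun h => ne_of_lt h)
    (hLgpw.imp fun h => ne_of_lt h)).mpr hmemMLg

theorem pv_main (n : Int) :
    generate_thread_combinations n = generate_thread_combinations_alt n := by
  simp only [generate_thread_combinations, generate_thread_combinations_alt]
  by_cases hn : 1 ≤ n
  · have hA : pvALoop n (PySem.List.pyRange 1 (n + 1) 1) [] =
        ((PySem.List.pyRange 1 (n + 1) 1).filter (fun t => PySem.Int.mod n t == 0)).map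
          (fun t => (PySem.Int.floordiv n t, t)) := by
      rw [pvALoop_eq]
      · simp
      · intro t ht
        have := PySem.List.mem_pyRange_one.mp ht
        omega
    set L := (PySem.List.pyRange 1 (n + 1) 1).filter (fun t => PySem.Int.mod n t == 0) with hL
    have hLpw : L.Pairwise (· < ·) := (PySem.List.pairwise_lt_pyRange_one ..).filter _
    have hLpos : ∀ a ∈ L, 1 ≤ a := by
      intro a ha
      have := PySem.List.mem_pyRange_one.mp (List.mem_of_mem_filter ha)
      omega
    have hLmem : ∀ t, t ∈ L ↔ 1 ≤ t ∧ t ≤ n ∧ t ∣ n := by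
      intro t
      rw [hL, List.mem_filter, PySem.List.mem_pyRange_one]
      constructor
      · rintro ⟨⟨h1, h2⟩, h3⟩
        exact ⟨h1, by omega, (PySem.Int.mod_eq_zero_iff_dvd n t).mp (by simpa using h3)⟩
      · rintro ⟨h1, h2, h3⟩
        exact ⟨⟨h1, by omega⟩, by simpa using (PySem.Int.mod_eq_zero_iff_dvd n t).mpr h3⟩
    have hsmall : pvBSmall n 1 [] = L.filter (fun t => decide (t * t ≤ n)) := by
      have h := pvBSmall_eq n 1 [] (le_refl 1)
      rw [Nat.cast_one] at h
      rw [h, List.nil_append, hL, List.filter_filter]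
    rw [hA, hsmall, pv_filterMap, pv_large n hn L hLpw hLmem, pv_split n L hLpw hLpos]
  · have hB : pvBSmall n 1 [] = [] := by
      rw [pvBSmall]
      norm_num
      omega
    rw [PySem.List.pyRange_one_eq_nil (by omega), hB]
    simp [pvALoop]

-- ===== VERDICT (by name: the statement is the Claim_ definition above) =====
theorem generate_thread_combinations_spec : Claim_equal_generate_thread_combinations := by
  intro n _
  unfold Spec_generate_thread_combinations
  exact pv_main n
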